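-- pv_equiv track=rewrite | github.com/Arsen1302/Code-copy-detector | TestData/solutions/problem_1112_2.py | solution_1112_2
-- ===== SOURCE A (Python) =====
-- def solution_1112_2(n: int) -> int:
--     if n == 0:
--         return 0
--     elif n == 1:
--         return 1
--     else:
--         nums = [0,1]
--         for i in range(2,n+1):
--             if i%2 == 0:
--                 nums.append(nums[i//2])
--             else:
--                 nums.append(nums[i//2]+nums[(i//2)+1])
--         return max(nums)
-- ===== SOURCE B (Python) =====
-- def solution_1112_2(n: int) -> int:
--     if n == 0:
--         return 0
--     if n == 1:
--         return 1
--     memo = [None] * (n + 1)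
--
--     def f(i):
--         if i == 0:
--             return 0
--         if i == 1:
--             return 1
--         if memo[i] is not None:
--             return memo[i]
--         if i % 2 == 0:
--             v = f(i // 2)
--         else:
--             v = f(i // 2) + f(i // 2 + 1)
--         memo[i] = v
--         return v
--
--     best = 1
--     for i in range(2, n + 1):
--         v = f(i)
--         if v > best:
--             best = v
--     return best
-- ===== Notes on version B (the rewrite author's own statement) =====
-- stated objective: alternative
-- what changed: Replaces the bottom-up array construction plus a final max() scan with a top-down memoized recursion over the halving structure and a running maximum, never materialising the array.
import Mathlib
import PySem

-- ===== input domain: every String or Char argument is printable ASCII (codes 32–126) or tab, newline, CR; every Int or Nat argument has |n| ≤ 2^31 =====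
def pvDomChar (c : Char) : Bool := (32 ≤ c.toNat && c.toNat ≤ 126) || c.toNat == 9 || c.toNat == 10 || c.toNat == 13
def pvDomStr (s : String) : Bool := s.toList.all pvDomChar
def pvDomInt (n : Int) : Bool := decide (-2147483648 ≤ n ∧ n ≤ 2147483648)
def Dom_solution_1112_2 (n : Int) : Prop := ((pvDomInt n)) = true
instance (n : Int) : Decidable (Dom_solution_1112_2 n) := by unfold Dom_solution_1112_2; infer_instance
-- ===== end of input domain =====

-- B replaces A's bottom-up array + final max() scan by a top-down memoized recursion
-- over the halving structure with a running maximum (objective: alternative).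

-- ===== PORT A =====
def solution_1112_2 (n : Int) : Int :=
  if n == 0 then 0
  else if n == 1 then 1
  else
    let nums := (PySem.List.pyRange 2 (n+1) 1).foldl (fun nums i =>
      if PySem.Int.mod i 2 == 0 then
        nums ++ [PySem.List.pyGetD nums (PySem.Int.floordiv i 2) 0]
      else
        nums ++ [PySem.List.pyGetD nums (PySem.Int.floordiv i 2) 0 +
                 PySem.List.pyGetD nums (PySem.Int.floordiv i 2 + 1) 0]) [0, 1]
    (PySem.List.max? nums (fun x => x)).getD 0

-- ===== PORT B =====
-- B's memoized helper f, threading the flat memo cache through the recursion.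
-- Structural recursion on a fuel argument (always called with fuel = i, enough
-- for the halving recursion): a totality device only, not part of B's algorithm.
def fB : Nat → Nat → Array (Option Int) → Int × Array (Option Int)
  | _, 0, memo => (0, memo)
  | _, 1, memo => (1, memo)
  | 0, _+2, memo => (0, memo)
  | fuel+1, (j+2), memo =>
    match memo.getD (j+2) none with
    | some v => (v, memo)
    | none =>
      if (j+2) % 2 = 0 then
        let p := fB fuel ((j+2) / 2) memo
        (p.1, p.2.setIfInBounds (j+2) (some p.1))
      else
        let p := fB fuel ((j+2) / 2) memo
        let q := fB fuel ((j+2) / 2 + 1) p.2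
        (p.1 + q.1, q.2.setIfInBounds (j+2) (some (p.1 + q.1)))

def solution_1112_2_alt (n : Int) : Int :=
  if n == 0 then 0
  else if n == 1 then 1
  else
    ((PySem.List.pyRange 2 (n+1) 1).foldl
      (fun (st : Int × Array (Option Int)) i =>
        let p := fB i.toNat i.toNat st.2
        (if p.1 > st.1 then p.1 else st.1, p.2)) (1, Array.replicate (n+1).toNat none)).1

-- ===== PRECONDITION & SPEC =====
def Spec_solution_1112_2 (n : Int) (out : Int) : Prop := out = solution_1112_2_alt n
instance (n : Int) (out : Int) : Decidable (Spec_solution_1112_2 n out) := by unfold Spec_solution_1112_2; infer_instance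

-- ===== CLAIM (what is proved, stated in full; the proofs are below) =====
def Claim_equal_solution_1112_2 : Prop := ∀ (n : Int), Dom_solution_1112_2 n → Spec_solution_1112_2 n (solution_1112_2 n)

-- ===== LEMMAS AND PROOFS =====

-- the pure recurrence both programs compute
def g : Nat → Int
  | 0 => 0
  | 1 => 1
  | (i+2) =>
    if (i+2) % 2 = 0 then g ((i+2) / 2)
    else g ((i+2) / 2) + g ((i+2) / 2 + 1)
termination_by i => i
decreasing_by all_goals omega

theorem g_zero : g 0 = 0 := by rw [g]

theorem g_one : g 1 = 1 := by rw [g]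

theorem g_two (i : Nat) : g (i+2)
    = if (i+2) % 2 = 0 then g ((i+2)/2) else g ((i+2)/2) + g ((i+2)/2+1) := by
  conv_lhs => rw [g]

-- a memo is good if it only stores correct values of g
def Good (a : Array (Option Int)) : Prop := ∀ k v, a.getD k none = some v → v = g k

theorem good_init (m : Nat) : Good (Array.replicate m none) := by
  intro k v h
  rw [Array.getD_eq_getD_getElem?, Array.getElem?_replicate] at h
  split at h <;> simp at h

theorem good_insert {a : Array (Option Int)} (ha : Good a) (k : Nat) :
    Good (a.setIfInBounds k (some (g k))) := by
  intro k' v h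
  rw [Array.getD_eq_getD_getElem?, Array.getElem?_setIfInBounds] at h
  by_cases hk : k = k'
  · subst hk
    by_cases hs : k < a.size
    · simp [hs] at h
      exact h.symm
    · simp [hs] at h
  · simp [hk] at h
    exact ha _ _ (by rw [Array.getD_eq_getD_getElem?]; exact h)

theorem fB_spec : ∀ (fuel : Nat), ∀ (i : Nat) (m : Array (Option Int)), i ≤ fuel → Good m →
    (fB fuel i m).1 = g i ∧ Good (fB fuel i m).2 := by
  intro fuel
  induction fuel with
  | zero =>
    intro i m hle hm
    interval_cases i
    rw [fB]
    exact ⟨g_zero.symm, hm⟩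
  | succ f ihf =>
    intro i m hle hm
    match i with
    | 0 => rw [fB]; exact ⟨g_zero.symm, hm⟩
    | 1 => rw [fB]; exact ⟨g_one.symm, hm⟩
    | (j+2) =>
      rw [fB]
      cases hget : m.getD (j+2) none with
      | some v => exact ⟨hm _ _ hget, hm⟩
      | none =>
        by_cases hpar : (j+2) % 2 = 0
        · obtain ⟨h1, h2⟩ := ihf ((j+2)/2) m (by omega) hm
          have hg : g (j+2) = g ((j+2)/2) := by rw [g_two, if_pos hpar]
          simp only [hpar, if_pos]
          refine ⟨by rw [h1, hg], ?_⟩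
          rw [h1, ← hg]
          exact good_insert h2 (j+2)
        · obtain ⟨h1, h2⟩ := ihf ((j+2)/2) m (by omega) hm
          obtain ⟨h3, h4⟩ := ihf ((j+2)/2 + 1) _ (by omega) h2
          have hg : g (j+2) = g ((j+2)/2) + g ((j+2)/2 + 1) := by rw [g_two, if_neg hpar]
          simp only [hpar, if_neg, not_false_iff]
          refine ⟨by rw [h1, h3, hg], ?_⟩
          rw [h1, h3, ← hg]
          exact good_insert h4 (j+2)

-- A's loop builds exactly the table of g
theorem numsA_eq : ∀ (b : Nat),
    ((PySem.List.pyRange 2 ((b:Int) + 2) 1).foldl (fun nums i =>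
      if PySem.Int.mod i 2 == 0 then
        nums ++ [PySem.List.pyGetD nums (PySem.Int.floordiv i 2) 0]
      else
        nums ++ [PySem.List.pyGetD nums (PySem.Int.floordiv i 2) 0 +
                 PySem.List.pyGetD nums (PySem.Int.floordiv i 2 + 1) 0]) [0, 1])
    = (List.range (b + 2)).map g := by
  intro b
  induction b with
  | zero =>
    rw [PySem.List.pyRange_one_eq_nil (by omega)]
    simp [List.range_succ, g_zero, g_one]
  | succ k ih =>
    have hsplit : PySem.List.pyRange 2 ((k:Int) + 1 + 2) 1
        = PySem.List.pyRange 2 ((k:Int) + 2) 1 ++ [(k:Int) + 2] := by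
      have := PySem.List.pyRange_one_succ_right (a := 2) (b := (k:Int) + 2) (by omega)
      rw [show (k:Int) + 1 + 2 = ((k:Int) + 2) + 1 by ring]
      exact this
    rw [show ((k+1 : Nat):Int) + 2 = (k:Int) + 1 + 2 by push_cast; ring, hsplit,
        List.foldl_append, ih]
    have hcast : (k:Int) + 2 = ((k + 2 : Nat) : Int) := by push_cast; ring
    have hmod : PySem.Int.mod ((k:Int) + 2) 2 = (((k + 2) % 2 : Nat) : Int) := by
      rw [hcast]; exact_mod_cast PySem.Int.mod_natCast (k+2) 2
    have hdiv : PySem.Int.floordiv ((k:Int) + 2) 2 = (((k + 2) / 2 : Nat) : Int) := by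
      rw [hcast]; exact_mod_cast PySem.Int.floordiv_natCast (k+2) 2
    have hget1 : PySem.List.pyGetD ((List.range (k + 2)).map g) (((k + 2) / 2 : Nat) : Int) 0
        = g ((k + 2) / 2) := by
      rw [PySem.List.pyGetD_natCast,
          List.getD_eq_getElem _ _ (by simp only [List.length_map, List.length_range]; omega),
          List.getElem_map, List.getElem_range]
    simp only [List.foldl_cons, List.foldl_nil, hmod, hdiv]
    by_cases hpar : (k + 2) % 2 = 0
    · have hg : g (k + 2) = g ((k + 2) / 2) := by rw [g_two, if_pos hpar]
      rw [if_pos (show ((((k + 2) % 2 : Nat) : Int) == 0) = true by simp [hpar]), hget1,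
          show k + 1 + 2 = (k + 2) + 1 by omega]
      conv_rhs => rw [List.range_succ]
      simp [hg]
    · have hgetb : PySem.List.pyGetD ((List.range (k + 2)).map g) ((((k + 2) / 2 : Nat) : Int) + 1) 0
          = g ((k + 2) / 2 + 1) := by
        rw [show (((k + 2) / 2 : Nat) : Int) + 1 = (((k + 2) / 2 + 1 : Nat) : Int) by push_cast; ring,
            PySem.List.pyGetD_natCast,
            List.getD_eq_getElem _ _ (by simp only [List.length_map, List.length_range]; omega),
            List.getElem_map, List.getElem_range]
      have hg : g (k + 2) = g ((k + 2) / 2) + g ((k + 2) / 2 + 1) := by rw [g_two, if_neg hpar]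
      rw [if_neg (show ¬ ((((k + 2) % 2 : Nat) : Int) == 0) = true by simp; omega), hget1, hgetb,
          show k + 1 + 2 = (k + 2) + 1 by omega]
      conv_rhs => rw [List.range_succ]
      simp [hg]

-- B's loop is a running maximum of g
theorem bloop : ∀ (l : List Int) (best : Int) (m : Array (Option Int)), Good m →
    (l.foldl (fun (st : Int × Array (Option Int)) i =>
        let p := fB i.toNat i.toNat st.2
        (if p.1 > st.1 then p.1 else st.1, p.2)) (best, m)).1
    = l.foldl (fun b i => max b (g i.toNat)) best := by
  intro l
  induction l with
  | nil => intro best m _; rfl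
  | cons x t ihl =>
    intro best m hm
    obtain ⟨h1, h2⟩ := fB_spec x.toNat x.toNat m le_rfl hm
    simp only [List.foldl_cons]
    rw [ihl _ _ h2]
    congr 1
    rw [h1, max_def]
    split <;> split <;> omega

theorem map_g_range : ∀ n, (List.range (n+2)).map g
    = 0 :: 1 :: (List.range n).map (fun t => g (t+2)) := by
  intro n
  induction n with
  | zero => simp [List.range_succ, g_zero, g_one]
  | succ k ih =>
    rw [show k + 1 + 2 = (k + 2) + 1 by omega, List.range_succ, List.map_append, ih,
        List.range_succ, List.map_append]
    simp

theorem solution_1112_2_spec : Claim_equal_solution_1112_2 := by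
  intro n _
  unfold Spec_solution_1112_2 solution_1112_2 solution_1112_2_alt
  by_cases h0 : n = 0
  · simp [h0]
  by_cases h1 : n = 1
  · simp [h1]
  have e0 : (n == 0) = false := by simp [h0]
  have e1 : (n == 1) = false := by simp [h1]
  simp only [e0, e1, Bool.false_eq_true, if_false]
  by_cases hlt : n < 2
  · rw [PySem.List.pyRange_one_eq_nil (by omega)]
    simp [PySem.List.max?]
  · -- n ≥ 2 : write n = k + 2
    obtain ⟨k, hk⟩ : ∃ k : Nat, n = (k:Int) + 2 := ⟨(n - 2).toNat, by omega⟩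
    subst hk
    have hA := numsA_eq (k + 1)
    rw [show (k:Int) + 2 + 1 = ((k+1 : Nat):Int) + 2 by push_cast; ring]
    rw [hA, bloop _ 1 _ (good_init _)]
    rw [show k + 1 + 2 = (k + 1) + 2 by omega, map_g_range (k+1)]
    rw [PySem.List.max?_id_cons]
    simp only [List.foldl_cons, Option.getD_some]
    rw [show max (0:Int) 1 = 1 by decide]
    rw [show ((k+1 : Nat):Int) + 2 = ((k + 1 + 2 : Nat) : Int) by push_cast; ring,
        PySem.List.pyRange_one,
        show (((k + 1 + 2 : Nat) : Int) - 2).toNat = k + 1 by omega,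
        List.foldl_map, List.foldl_map]
    have hfun : ∀ (b : Int) (t : Nat), max b (g ((2 + (t:Int)).toNat)) = max b (g (t+2)) := by
      intro b t
      have h2 : ((2:Int) + (t:Int)).toNat = t + 2 := by omega
      rw [h2]
    simp only [hfun]
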